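-- pv_equiv track=rewrite | github.com/tinzzyli/eff_atk | vit/stra_attack.py | allocation_strategy
-- ===== SOURCE A (Python) =====
-- def allocation_strategy(frameRate):
--     K = 1000
--     next_reactivate = {}  # 下一次需要重新激活的时间
--     max_active = 0  # 最大可用跟踪器数量
--     strategy = []
--     tracker_id = 0
--     t = 0
--     while(t<K):
--         if t == 0:
--             strategy.append(tracker_id)
--             next_reactivate[tracker_id] = t+frameRate+1
--             tracker_id += 1
--             t+=1
--         else:
--             reactivate_time = min(next_reactivate.values())
--             reactivate_tracker, reactivate_time = min(next_reactivate.items(), key=lambda x: x[1])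
--             if reactivate_time - t <= 1:
--                 strategy.append(reactivate_tracker)
--                 next_reactivate[reactivate_tracker] = t+frameRate+1
--                 t+=1
--             else:
--                 strategy.append(tracker_id)
--                 strategy.append(tracker_id)
--                 next_reactivate[tracker_id] = t+frameRate+2
--                 tracker_id += 1
--                 t+=2
--     return strategy, tracker_id
-- ===== SOURCE B (Python) =====
-- def allocation_strategy(frameRate):
--     # Two staged passes: first decide the shape of the schedule (reuse vs. create)
--     # from the pending reactivation times alone (a time-ordered FIFO, so the
--     # earliest pending time is always the front -- no min-scan); then assign
--     # tracker ids by replaying those decisions over a rotating ring of ids.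
--     K = 1000
--     decisions = []
--     times = [frameRate + 1]   # pending reactivation times, strictly increasing
--     t = 1
--     while t < K:
--         if times[0] - t <= 1:
--             decisions.append(True)
--             times = times[1:] + [t + frameRate + 1]
--             t += 1
--         else:
--             decisions.append(False)
--             times = times + [t + frameRate + 2]
--             t += 2
--     strategy = [0]
--     ring = [0]                # tracker ids in order of pending reactivation
--     next_id = 1
--     for reuse in decisions:
--         if reuse:
--             i = ring[0]
--             strategy.append(i)
--             ring = ring[1:] + [i]
--         else:
--             strategy.append(next_id)
--             strategy.append(next_id)
--             ring = ring + [next_id]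
--             next_id += 1
--     return strategy, next_id
-- ===== Notes on version B (the rewrite author's own statement) =====
-- stated objective: alternative
-- what changed: Replace A's single loop with a per-step min-scan over the reactivation dict by two staged passes: a shape pass over a time-ordered FIFO of pending times (front = minimum, no scan) producing a reuse/create decision list, then an id-assignment pass replaying the decisions over a rotating ring of tracker ids.
import Mathlib
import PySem

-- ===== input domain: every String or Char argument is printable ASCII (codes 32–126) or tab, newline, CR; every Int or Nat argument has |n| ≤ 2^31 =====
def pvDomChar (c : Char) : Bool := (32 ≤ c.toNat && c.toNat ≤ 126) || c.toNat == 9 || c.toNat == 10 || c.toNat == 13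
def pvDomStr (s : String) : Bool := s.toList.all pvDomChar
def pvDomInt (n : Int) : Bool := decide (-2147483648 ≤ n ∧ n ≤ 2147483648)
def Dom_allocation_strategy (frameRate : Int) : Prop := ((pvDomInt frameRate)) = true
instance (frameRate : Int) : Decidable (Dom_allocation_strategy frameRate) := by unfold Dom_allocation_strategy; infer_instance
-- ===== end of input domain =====

-- B replaces A's single loop with a per-step min-scan over the reactivation dict by two
-- staged passes: a shape pass over a time-ordered FIFO of pending times (front = minimum,
-- no scan) producing a reuse/create decision list, then an id-assignment pass replaying
-- the decisions over a rotating ring of tracker ids; same outputs (alternative structure).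


-- ===== PORT A =====
-- A's while loop, one constructor of fuel per iteration; t grows by ≥ 1 each
-- iteration, so fuel 1000 ≥ K - t is enough and the fuel guard is never the
-- exit (it only makes the recursion structural).  A's binding
-- `reactivate_time = min(next_reactivate.values())` is dead code (immediately
-- overwritten by the min over items, and it raises exactly when that min does,
-- i.e. never, the dict being nonempty), so it is not re-evaluated here.
def allocLoopA (frameRate : Int) : Nat → PySem.Dict Int Int → Int → Int → List Int → List Int × Int
  | 0, _, tid, _, strat => (strat, tid)
  | fuel + 1, d, tid, t, strat =>
    if t < 1000 then
      if t = 0 then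
        allocLoopA frameRate fuel (d.insert tid (t + frameRate + 1)) (tid + 1) (t + 1)
          (strat ++ [tid])
      else
        match PySem.List.min? d.items (fun x => x.2) with
        | none => (strat, tid)   -- empty dict: Python's min would raise; unreachable (d is never empty)
        | some m =>
          if m.2 - t ≤ 1 then
            allocLoopA frameRate fuel (d.insert m.1 (t + frameRate + 1)) tid (t + 1)
              (strat ++ [m.1])
          else
            allocLoopA frameRate fuel (d.insert tid (t + frameRate + 2)) (tid + 1) (t + 2)
              (strat ++ [tid, tid])
    else (strat, tid)

def allocation_strategy (frameRate : Int) : List Int × Int :=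
  allocLoopA frameRate 1000 PySem.Dict.empty 0 0 []

-- ===== PORT B =====
-- Source B's first while loop (the shape pass).  The Python builds `decisions` by
-- appending in order; the recursion produces the same list front-to-back by
-- cons.  `times[0]` on an empty list would raise in Python; unreachable, the
-- FIFO never shrinks.
def allocDecide (frameRate : Int) : Nat → List Int → Int → List Bool
  | 0, _, _ => []
  | fuel + 1, times, t =>
    if t < 1000 then
      match times with
      | [] => []   -- IndexError in Python; unreachable
      | rt :: rest =>
        if rt - t ≤ 1 then
          true :: allocDecide frameRate fuel (rest ++ [t + frameRate + 1]) (t + 1)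
        else
          false :: allocDecide frameRate fuel (rt :: rest ++ [t + frameRate + 2]) (t + 2)
    else []

-- Source B's second pass: one step of the `for reuse in decisions` loop over the
-- state (strategy, ring, next_id); `ring[0]` on [] would raise; unreachable.
def allocAssign (acc : List Int × List Int × Int) (reuse : Bool) : List Int × List Int × Int :=
  if reuse then
    match acc.2.1 with
    | [] => acc   -- IndexError in Python; unreachable
    | i :: rest => (acc.1 ++ [i], rest ++ [i], acc.2.2)
  else
    (acc.1 ++ [acc.2.2, acc.2.2], acc.2.1 ++ [acc.2.2], acc.2.2 + 1)

def allocation_strategy_alt (frameRate : Int) : List Int × Int :=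
  let r := (allocDecide frameRate 999 [frameRate + 1] 1).foldl allocAssign ([0], [0], 1)
  (r.1, r.2.2)

-- ===== PRECONDITION & SPEC =====
def Spec_allocation_strategy (frameRate : Int) (out : List Int × Int) : Prop := out = allocation_strategy_alt frameRate
instance (frameRate : Int) (out : List Int × Int) : Decidable (Spec_allocation_strategy frameRate out) := by unfold Spec_allocation_strategy; infer_instance

-- ===== CLAIM (what is proved, stated in full; the proofs are below) =====
def Claim_equal_allocation_strategy : Prop := ∀ (frameRate : Int), Dom_allocation_strategy frameRate → Spec_allocation_strategy frameRate (allocation_strategy frameRate)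

-- ===== LEMMAS AND PROOFS =====

-- The simulation invariant: A's dict holds exactly the pairs of B's ring of ids
-- zipped with B's FIFO of times; the times strictly increase, the ids are
-- distinct, every pending time is ≤ t + frameRate, and all dict keys are < tid.
def AllocInv (f : Int) (d : PySem.Dict Int Int) (ring times : List Int)
    (tid t : Int) : Prop :=
  let p := ring.zip times
  ring.length = times.length ∧
  p ≠ [] ∧
  List.Pairwise (fun a b : Int × Int => a.2 < b.2) p ∧
  (p.map Prod.fst).Nodup ∧
  d.keys.Nodup ∧
  (∀ k, k ∈ d.keys ↔ k ∈ p.map Prod.fst) ∧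
  (∀ pr ∈ p, d.get? pr.1 = some pr.2) ∧
  (∀ k ∈ d.keys, k < tid) ∧
  (∀ pr ∈ p, pr.2 ≤ t + f)

lemma items_subset_live (d : PySem.Dict Int Int) (p : List (Int × Int))
    (hnd : d.keys.Nodup)
    (hkeys : ∀ k, k ∈ d.keys ↔ k ∈ p.map Prod.fst)
    (hget : ∀ pr ∈ p, d.get? pr.1 = some pr.2) :
    ∀ x ∈ d.items, x ∈ p := by
  intro x hx
  have hk : x.1 ∈ d.keys := PySem.Dict.mem_keys_of_mem_items d hx
  rw [hkeys] at hk
  rcases List.mem_map.mp hk with ⟨pr, hpr, hfst⟩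
  have h1 : d.get? x.1 = some x.2 :=
    PySem.Dict.get?_of_mem_items d (show (x.1, x.2) ∈ d.items by simpa using hx) hnd
  have h2 : d.get? pr.1 = some pr.2 := hget pr hpr
  rw [hfst] at h2
  have : x.2 = pr.2 := by rw [h1] at h2; exact Option.some.inj h2
  have hxpr : x = pr := Prod.ext hfst.symm this
  rwa [hxpr]

-- With the invariant, A's `min(items, key=value)` is exactly the zip's front.
lemma min_eq_front (d : PySem.Dict Int Int) (m : Int × Int) (tl : List (Int × Int))
    (hpair : List.Pairwise (fun a b : Int × Int => a.2 < b.2) (m :: tl))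
    (hnd : d.keys.Nodup)
    (hkeys : ∀ k, k ∈ d.keys ↔ k ∈ (m :: tl).map Prod.fst)
    (hget : ∀ pr ∈ m :: tl, d.get? pr.1 = some pr.2) :
    PySem.List.min? d.items (fun x => x.2) = some m := by
  have hmem : m ∈ d.items := by
    have := PySem.Dict.mem_items_of_get?_eq_some d (hget m (List.mem_cons_self))
    simpa using this
  have hne : d.items ≠ [] := by intro h; rw [h] at hmem; exact List.not_mem_nil hmem
  cases hmin : PySem.List.min? d.items (fun x : Int × Int => x.2) with
  | none => rw [PySem.List.min?_eq_none_iff] at hmin; exact absurd hmin hne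
  | some x =>
    have hxmem : x ∈ d.items := PySem.List.min?_mem hmin
    have hxle : x.2 ≤ m.2 := PySem.List.min?_isMin hmin m hmem
    have hxp : x ∈ m :: tl := items_subset_live d (m :: tl) hnd hkeys hget x hxmem
    rcases List.mem_cons.mp hxp with h | h
    · rw [h]
    · have : m.2 < x.2 := (List.pairwise_cons.mp hpair).1 x h
      omega

lemma loop_eq (f : Int) : ∀ (fuel : Nat) (d : PySem.Dict Int Int)
    (ring times : List Int) (tid t : Int) (strat : List Int),
    1 ≤ t → AllocInv f d ring times tid t →
    allocLoopA f fuel d tid t strat =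
      (let r := (allocDecide f fuel times t).foldl allocAssign (strat, ring, tid)
       (r.1, r.2.2)) := by
  intro fuel
  induction fuel with
  | zero => intro d ring times tid t strat _ _; rfl
  | succ n ih =>
    intro d ring times tid t strat ht hinv
    obtain ⟨hlen, hne, hpair, hknd, hnd, hkeys, hget, hlt, hbound⟩ := hinv
    by_cases hlt1000 : t < 1000
    · have ht0 : ¬ t = 0 := by omega
      -- ring and times are nonempty
      obtain ⟨i, irest, hr⟩ : ∃ i irest, ring = i :: irest := by
        cases ring with
        | nil => simp at hne
        | cons a l => exact ⟨a, l, rfl⟩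
      obtain ⟨rt, trest, htm⟩ : ∃ rt trest, times = rt :: trest := by
        cases times with
        | nil => rw [List.zip_nil_right] at hne; simp at hne
        | cons a l => exact ⟨a, l, rfl⟩
      subst hr htm
      have hlen' : irest.length = trest.length := by simpa using hlen
      have hzip : (i :: irest).zip (rt :: trest) = (i, rt) :: irest.zip trest := rfl
      rw [hzip] at hpair hknd hkeys hget hbound
      have hmin := min_eq_front d (i, rt) (irest.zip trest) hpair hnd hkeys hget
      simp only [allocLoopA, allocDecide, if_pos hlt1000, if_neg ht0, hmin]
      by_cases hcond : rt - t ≤ 1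
      · -- reuse: pop the FIFO fronts, append (i, t+f+1) at the back
        have hinv' : AllocInv f (d.insert i (t + f + 1)) (irest ++ [i])
            (trest ++ [t + f + 1]) tid (t + 1) := by
          have hzip' : (irest ++ [i]).zip (trest ++ [t + f + 1])
              = irest.zip trest ++ [(i, t + f + 1)] := by
            rw [List.zip_append hlen']; rfl
          have himem : i ∈ d.keys := by
            rw [hkeys]; exact List.mem_map.mpr ⟨(i, rt), List.mem_cons_self, rfl⟩
          have hcontm : d.contains i = true := by
            rw [PySem.Dict.contains_eq_decide_mem_keys]; exact decide_eq_true himem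
          have htlkeys : ∀ pr ∈ irest.zip trest, pr.1 ≠ i := by
            intro pr hpr heq
            have := (List.nodup_cons.mp hknd).1
            exact this (List.mem_map.mpr ⟨pr, hpr, heq⟩)
          unfold AllocInv
          refine ⟨by simp [hlen'], ?_, ?_, ?_, ?_, ?_, ?_, ?_, ?_⟩ <;> try rw [hzip']
          · simp
          · rw [List.pairwise_append]
            refine ⟨(List.pairwise_cons.mp hpair).2, List.pairwise_singleton _ _, ?_⟩
            intro a ha b hb
            have : a.2 ≤ t + f := hbound a (List.mem_cons_of_mem (i, rt) ha)
            simp only [List.mem_singleton] at hb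
            rw [hb]; omega
          · rw [List.map_append, List.nodup_append]
            refine ⟨(List.nodup_cons.mp hknd).2, by exact List.nodup_singleton _, ?_⟩
            intro a hamem b hbmem
            rcases List.mem_map.mp hamem with ⟨pr, hpr, hfst⟩
            have hb : b = i := by
              rcases List.mem_map.mp hbmem with ⟨pr', hpr', hfst'⟩
              rw [List.mem_singleton.mp hpr'] at hfst'
              exact hfst'.symm
            exact fun heq => htlkeys pr hpr (hfst.trans (heq.trans hb))
          · rwa [PySem.Dict.keys_insert_of_contains d _ hcontm]
          · intro k
            rw [PySem.Dict.keys_insert_of_contains d _ hcontm]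
            rw [hkeys k]; simp [or_comm]
          · intro pr hpr
            rcases List.mem_append.mp hpr with h | h
            · rw [PySem.Dict.get?_insert_of_ne _ _ (htlkeys pr h)]
              exact hget pr (List.mem_cons_of_mem (i, rt) h)
            · simp only [List.mem_singleton] at h
              rw [h]; exact PySem.Dict.get?_insert_self _ _ _
          · intro k hk
            rw [PySem.Dict.keys_insert_of_contains d _ hcontm] at hk
            exact hlt k hk
          · intro pr hpr
            rcases List.mem_append.mp hpr with h | h
            · have := hbound pr (List.mem_cons_of_mem (i, rt) h); omega
            · simp only [List.mem_singleton] at h; rw [h]; omega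
        rw [if_pos (show ((i, rt) : Int × Int).2 - t ≤ 1 from hcond), if_pos hcond]
        simp only [List.foldl_cons, allocAssign]
        rw [ih (d.insert i (t + f + 1)) (irest ++ [i]) (trest ++ [t + f + 1]) tid (t + 1)
            (strat ++ [i]) (by omega) hinv']
        simp
      · -- create: a fresh tracker id goes to the back of the ring
        have hinv' : AllocInv f (d.insert tid (t + f + 2)) (i :: (irest ++ [tid]))
            (rt :: (trest ++ [t + f + 2])) (tid + 1) (t + 2) := by
          have hzip' : (i :: (irest ++ [tid])).zip (rt :: (trest ++ [t + f + 2]))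
              = ((i, rt) :: irest.zip trest) ++ [(tid, t + f + 2)] := by
            rw [List.zip_cons_cons, List.zip_append hlen']; rfl
          have htidfresh : tid ∉ d.keys := fun h => absurd (hlt tid h) (by omega)
          have hcont : d.contains tid = false := by
            rw [PySem.Dict.contains_eq_decide_mem_keys]; exact decide_eq_false htidfresh
          have hpkeys_lt : ∀ pr ∈ (i, rt) :: irest.zip trest, pr.1 ≠ tid := by
            intro pr hpr heq
            have : pr.1 ∈ d.keys := by
              rw [hkeys]; exact List.mem_map.mpr ⟨pr, hpr, rfl⟩
            have := hlt pr.1 this; omega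
          unfold AllocInv
          refine ⟨by simp [hlen'], ?_, ?_, ?_, ?_, ?_, ?_, ?_, ?_⟩ <;> try rw [hzip']
          · simp
          · rw [List.pairwise_append]
            refine ⟨hpair, List.pairwise_singleton _ _, ?_⟩
            intro a ha b hb
            have := hbound a ha
            simp only [List.mem_singleton] at hb
            rw [hb]; omega
          · rw [List.map_append, List.nodup_append]
            refine ⟨hknd, by exact List.nodup_singleton _, ?_⟩
            intro a hamem b hbmem
            rcases List.mem_map.mp hamem with ⟨pr, hpr, hfst⟩
            have hb : b = tid := by
              rcases List.mem_map.mp hbmem with ⟨pr', hpr', hfst'⟩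
              rw [List.mem_singleton.mp hpr'] at hfst'
              exact hfst'.symm
            exact fun heq => hpkeys_lt pr hpr (hfst.trans (heq.trans hb))
          · rw [PySem.Dict.keys_insert_of_not_contains d _ hcont]
            rw [List.nodup_append]
            refine ⟨hnd, List.nodup_singleton _, ?_⟩
            intro a ha b hb
            have hb' : b = tid := List.mem_singleton.mp hb
            exact fun heq => htidfresh (by rw [← heq.trans hb']; exact ha)
          · intro k
            rw [PySem.Dict.keys_insert_of_not_contains d _ hcont]
            simp only [List.mem_append, List.map_append, List.map_cons, List.map_nil]
            rw [hkeys k]; simp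
          · intro pr hpr
            rcases List.mem_append.mp hpr with h | h
            · rw [PySem.Dict.get?_insert_of_ne _ _ (hpkeys_lt pr h)]
              exact hget pr h
            · simp only [List.mem_singleton] at h
              rw [h]; exact PySem.Dict.get?_insert_self _ _ _
          · intro k hk
            rw [PySem.Dict.keys_insert_of_not_contains d _ hcont] at hk
            rcases List.mem_append.mp hk with h | h
            · have := hlt k h; omega
            · simp only [List.mem_singleton] at h; omega
          · intro pr hpr
            rcases List.mem_append.mp hpr with h | h
            · have := hbound pr h; omega
            · simp only [List.mem_singleton] at h; rw [h]; omega
        rw [if_neg (show ¬ (((i, rt) : Int × Int).2 - t ≤ 1) from hcond), if_neg hcond]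
        simp only [List.foldl_cons, allocAssign, List.cons_append]
        rw [ih (d.insert tid (t + f + 2)) (i :: (irest ++ [tid]))
            (rt :: (trest ++ [t + f + 2])) (tid + 1) (t + 2) (strat ++ [tid, tid])
            (by omega) hinv']
        simp
    · simp [allocLoopA, allocDecide, if_neg hlt1000]

-- ===== VERDICT (by name: the statement is the Claim_ definition above) =====
theorem allocation_strategy_spec : Claim_equal_allocation_strategy := by
  intro f _
  unfold Spec_allocation_strategy allocation_strategy allocation_strategy_alt
  -- unroll A's first iteration (the t == 0 branch)
  have h1 : allocLoopA f 1000 PySem.Dict.empty 0 0 []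
      = allocLoopA f 999 (PySem.Dict.empty.insert 0 (0 + f + 1)) (0 + 1) (0 + 1) ([] ++ [0]) := rfl
  rw [h1]
  have h2 : (0 : Int) + f + 1 = f + 1 := by ring
  have h3 : (0 : Int) + 1 = 1 := by ring
  rw [h2, h3, List.nil_append]
  rw [loop_eq f 999 _ [0] [f + 1] 1 1 [0] le_rfl ?_]
  have hkeys0 : (PySem.Dict.empty.insert (0 : Int) (f + 1)).keys = [0] := rfl
  refine ⟨rfl, by simp, by simp, by simp, ?_, ?_, ?_, ?_, ?_⟩
  · rw [hkeys0]; simp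
  · intro k; rw [hkeys0]; simp
  · intro pr hpr
    simp only [List.zip_cons_cons, List.zip_nil_right, List.mem_singleton] at hpr
    rw [hpr]; exact PySem.Dict.get?_insert_self _ _ _
  · intro k hk
    rw [hkeys0] at hk
    simp at hk
    omega
  · intro pr hpr
    simp only [List.zip_cons_cons, List.zip_nil_right, List.mem_singleton] at hpr
    rw [hpr]; omega
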